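-- pv_equiv track=rewrite | github.com/smilechien/raschcat | raschcat.py | ordered_options
-- ===== SOURCE A (Python) =====
-- from typing import Dict, List, Optional, Tuple
--
-- OPTION_LABELS = ["A", "B", "C", "D", "E", "F", "G"]
--
-- def ordered_options(options: Dict[str, str]) -> Dict[str, str]:
--     if not options:
--         return {}
--     ordered: Dict[str, str] = {}
--     for lab in OPTION_LABELS:
--         if lab in options:
--             ordered[lab] = options[lab]
--     for lab in sorted(options.keys()):
--         if lab not in ordered:
--             ordered[lab] = options[lab]
--     return ordered
-- ===== SOURCE B (Python) =====
-- OPTION_LABELS = ["A", "B", "C", "D", "E", "F", "G"]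
--
-- def ordered_options(options):
--     # The preferred labels A..G are themselves in alphabetical order, so the
--     # result is: sorted labeled keys, then sorted remaining keys, one dict build.
--     labeled = sorted(k for k in options if k in OPTION_LABELS)
--     rest = sorted(k for k in options if k not in OPTION_LABELS)
--     return {k: options[k] for k in labeled + rest}
-- ===== Notes on version B (the rewrite author's own statement) =====
-- stated objective: alternative
-- what changed: Instead of A's two phased loops (probe the dict for each of the seven preferred labels, then scan the sorted key list skipping keys already placed), B partitions the keys into labeled/unlabeled, sorts each part (the preferred labels A..G are already alphabetical), and builds the result dict in a single comprehension over the concatenated key order.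
import Mathlib
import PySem

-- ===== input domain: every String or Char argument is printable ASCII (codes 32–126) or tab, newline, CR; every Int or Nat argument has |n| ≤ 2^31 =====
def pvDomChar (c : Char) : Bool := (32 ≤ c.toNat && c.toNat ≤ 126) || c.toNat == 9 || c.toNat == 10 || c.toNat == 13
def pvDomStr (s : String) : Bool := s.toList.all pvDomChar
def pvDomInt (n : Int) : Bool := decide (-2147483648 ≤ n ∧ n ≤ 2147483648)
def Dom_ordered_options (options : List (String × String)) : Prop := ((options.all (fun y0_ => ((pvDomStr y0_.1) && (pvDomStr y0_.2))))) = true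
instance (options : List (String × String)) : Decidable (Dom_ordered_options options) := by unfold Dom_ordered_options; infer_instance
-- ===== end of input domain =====

-- B reorders the dict by partitioning the keys into labeled/rest and sorting each part
-- (the preferred labels A..G are alphabetical), instead of A's two phased probe-loops;
-- objective: idiomatic/alternative, no speed claim.

-- ===== PORT A =====
def OPTION_LABELS : List String := ["A", "B", "C", "D", "E", "F", "G"]

def ordered_options (options : List (String × String)) : List (String × String) :=
  let d := PySem.Dict.ofList options
  if options.isEmpty then []
  else
    let ordered : PySem.Dict String String := OPTION_LABELS.foldl
      (fun o lab => if d.contains lab then o.insert lab (d.getD lab "") else o)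
      PySem.Dict.empty
    let ordered := (PySem.List.sorted d.keys (fun k => k) false).foldl
      (fun o lab => if o.contains lab then o else o.insert lab (d.getD lab ""))
      ordered
    ordered.items

-- ===== PORT B =====
def ordered_options_alt (options : List (String × String)) : List (String × String) :=
  let d := PySem.Dict.ofList options
  let labeled := PySem.List.sorted (d.keys.filter (fun k => OPTION_LABELS.contains k)) (fun k => k) false
  let rest := PySem.List.sorted (d.keys.filter (fun k => !OPTION_LABELS.contains k)) (fun k => k) false
  (labeled ++ rest).map (fun k => (k, d.getD k ""))

-- ===== PRECONDITION & SPEC =====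
def Spec_ordered_options (options : List (String × String)) (out : List (String × String)) : Prop := out = ordered_options_alt options
instance (options : List (String × String)) (out : List (String × String)) : Decidable (Spec_ordered_options options out) := by unfold Spec_ordered_options; infer_instance

-- ===== CLAIM (what is proved, stated in full; the proofs are below) =====
def Claim_equal_ordered_options : Prop := ∀ (options : List (String × String)), Dom_ordered_options options → Spec_ordered_options options (ordered_options options)

-- ===== LEMMAS AND PROOFS =====

-- A's second loop ('if lab not in ordered: ordered[lab] = …') over a duplicate-free list
-- appends exactly the pairs whose key is not already present.
theorem items_foldl_insert_guard {κ ν : Type} [BEq κ] [LawfulBEq κ]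
    (S : List κ) (f : κ → ν) (o : PySem.Dict κ ν) (hS : S.Nodup) :
    (S.foldl (fun o k => if o.contains k then o else o.insert k (f k)) o).items
      = o.items ++ (S.filter (fun k => !o.contains k)).map (fun k => (k, f k)) := by
  induction S generalizing o with
  | nil => simp
  | cons k S ih =>
    rcases List.nodup_cons.mp hS with ⟨hk, hS'⟩
    by_cases h : o.contains k = true
    · simp [List.foldl_cons, h, ih _ hS']
    · have h' : o.contains k = false := by simpa using h
      have hfc : S.filter (fun k' => !(o.insert k (f k)).contains k')
          = S.filter (fun k' => !o.contains k') := by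
        apply List.filter_congr
        intro x hx
        have hxk : (x == k) = false := by
          simp only [beq_eq_false_iff_ne]
          exact fun e => hk (e ▸ hx)
        simp [PySem.Dict.contains_insert, hxk]
      rw [List.foldl_cons, if_neg (by simp [h'])]
      rw [ih _ hS', PySem.Dict.items_insert_of_not_contains _ _ h', hfc]
      simp [h']

-- A's first loop over OPTION_LABELS equals the labels present in d, paired with their values.
theorem items_phase1 (d : PySem.Dict String String) :
    (OPTION_LABELS.foldl
        (fun o lab => if d.contains lab then o.insert lab (d.getD lab "") else o)
        PySem.Dict.empty).items
      = (OPTION_LABELS.filter (fun lab => d.contains lab)).map (fun k => (k, d.getD k "")) := by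
  rw [← List.foldl_filter]
  rw [PySem.Dict.items_foldl_insert_fresh (OPTION_LABELS.filter (fun lab => d.contains lab))
      (fun x => x) (fun a => d.getD a "") PySem.Dict.empty
      (fun a _ => PySem.Dict.contains_empty a)
      (by simpa using ((by decide : OPTION_LABELS.Nodup).filter _))]
  have he : (PySem.Dict.empty : PySem.Dict String String).items = [] := rfl
  simp [he]

-- sorting commutes with filtering a duplicate-free list of strings
theorem sorted_filter_comm (K : List String) (q : String → Bool) (h : K.Nodup) :
    PySem.List.sorted (K.filter q) (fun k => k) false
      = (PySem.List.sorted K (fun k => k) false).filter q := by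
  apply PySem.List.sorted_eq_of_perm_of_pairwise_lt
  · exact (PySem.List.sorted_perm K (fun k => k) false).filter q
  · have hs : (PySem.List.sorted K (fun k => k) false).Pairwise (· ≤ ·) :=
      PySem.List.sorted_pairwise K (fun k => k)
    have hn : (PySem.List.sorted K (fun k => k) false).Nodup :=
      ((PySem.List.sorted_perm K (fun k => k) false).nodup_iff).mpr h
    have hlt : (PySem.List.sorted K (fun k => k) false).Pairwise (· < ·) :=
      (hs.and hn).imp (fun hab => lt_of_le_of_ne hab.1 hab.2)
    exact hlt.sublist List.filter_sublist

-- the labels of d, in OPTION_LABELS order, are the sorted labeled keys of d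
theorem labels_filter_eq_sorted (d : PySem.Dict String String) (h : d.keys.Nodup) :
    PySem.List.sorted (d.keys.filter (fun k => OPTION_LABELS.contains k)) (fun k => k) false
      = OPTION_LABELS.filter (fun lab => d.contains lab) := by
  apply PySem.List.sorted_eq_of_perm_of_pairwise_lt
  · apply (List.perm_ext_iff_of_nodup ?_ ?_).mpr
    · intro x
      simp only [List.mem_filter, List.contains_iff_mem,
        PySem.Dict.contains_iff_mem_keys]
      tauto
    · exact ((by decide : OPTION_LABELS.Nodup).filter _)
    · exact h.filter _
  · have hlbl : OPTION_LABELS.Pairwise (· < ·) := by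
      simp only [OPTION_LABELS, List.pairwise_cons, List.mem_cons, List.not_mem_nil,
        String.lt_iff_toList_lt]
      simp
      decide
    exact hlbl.sublist List.filter_sublist

-- ===== VERDICT (by name: the statement is the Claim_ definition above) =====
theorem ordered_options_spec : Claim_equal_ordered_options := by
  intro options _
  unfold Spec_ordered_options ordered_options ordered_options_alt
  by_cases hopt : options = []
  · subst hopt; decide
  · set d := PySem.Dict.ofList options with hd
    have hK : d.keys.Nodup := PySem.Dict.nodup_keys_ofList options
    have hSnd : (PySem.List.sorted d.keys (fun k => k) false).Nodup :=
      ((PySem.List.sorted_perm d.keys (fun k => k) false).nodup_iff).mpr hK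
    rw [if_neg (by simp [hopt])]
    rw [items_foldl_insert_guard _ _ _ hSnd, items_phase1]
    -- rewrite the guard !o1.contains k into !OPTION_LABELS.contains k on keys of d
    have hguard : (PySem.List.sorted d.keys (fun k => k) false).filter
          (fun k => !((OPTION_LABELS.foldl
            (fun o lab => if d.contains lab then o.insert lab (d.getD lab "") else o)
            PySem.Dict.empty).contains k))
        = (PySem.List.sorted d.keys (fun k => k) false).filter
            (fun k => !OPTION_LABELS.contains k) := by
      apply List.filter_congr
      intro x hx
      have hxK : x ∈ d.keys := (PySem.List.mem_sorted _ _ _ _).mp hx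
      have hxc : d.contains x = true := (PySem.Dict.contains_iff_mem_keys d x).mpr hxK
      have hkeys : (OPTION_LABELS.foldl
            (fun o lab => if d.contains lab then o.insert lab (d.getD lab "") else o)
            PySem.Dict.empty).keys
          = OPTION_LABELS.filter (fun lab => d.contains lab) := by
        simp [PySem.Dict.keys, items_phase1, Function.comp_def]
      rw [show ∀ (o : PySem.Dict String String),
            o.contains x = decide (x ∈ o.keys) from
          fun o => PySem.Dict.contains_eq_decide_mem_keys o x]
      rw [hkeys]
      simp [List.mem_filter, hxc]
    rw [hguard, ← labels_filter_eq_sorted d hK, ← sorted_filter_comm d.keys _ hK]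
    simp [List.map_append]
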